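-- pv_equiv track=rewrite | github.com/jplfaria/ModelSEEDagent | src/tools/cobra/advanced_media_ai.py | _categorize_compounds
-- ===== SOURCE A (Python) =====
-- from typing import Any, Dict, List, Optional, Set, Tuple
--
-- def _categorize_compounds(compounds: List[str]) -> Dict[str, List[str]]:
--     """Categorize compounds by type"""
--     categories = {
--         "carbon_sources": [],
--         "nitrogen_sources": [],
--         "phosphorus_sources": [],
--         "sulfur_sources": [],
--         "amino_acids": [],
--         "vitamins": [],
--         "minerals": [],
--         "other": [],
--     }
--
--     # Simple categorization based on compound IDs (this could be enhanced with biochem data)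
--     for compound in compounds:
--         if "glc" in compound.lower() or "glucose" in compound.lower():
--             categories["carbon_sources"].append(compound)
--         elif "nh" in compound.lower() or "nitrogen" in compound.lower():
--             categories["nitrogen_sources"].append(compound)
--         elif "po" in compound.lower() or "phosphate" in compound.lower():
--             categories["phosphorus_sources"].append(compound)
--         elif "so" in compound.lower() or "sulfate" in compound.lower():
--             categories["sulfur_sources"].append(compound)
--         elif any(
--             aa in compound.lower()
--             for aa in [
--                 "ala",
--                 "arg",
--                 "asn",
--                 "asp",
--                 "cys",
--                 "glu",
--                 "gln",
--                 "gly",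
--                 "his",
--                 "ile",
--                 "leu",
--                 "lys",
--                 "met",
--                 "phe",
--                 "pro",
--                 "ser",
--                 "thr",
--                 "trp",
--                 "tyr",
--                 "val",
--             ]
--         ):
--             categories["amino_acids"].append(compound)
--         elif any(
--             vit in compound.lower()
--             for vit in [
--                 "vitamin",
--                 "thiamin",
--                 "riboflavin",
--                 "niacin",
--                 "folate",
--                 "cobalamin",
--             ]
--         ):
--             categories["vitamins"].append(compound)
--         elif any(
--             min in compound.lower()
--             for min in ["fe", "mg", "mn", "zn", "cu", "ca", "k", "na"]
--         ):
--             categories["minerals"].append(compound)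
--         else:
--             categories["other"].append(compound)
--
--     return categories
-- ===== SOURCE B (Python) =====
-- # B: table-driven grouping — a classifier walks an ordered (category, patterns) table,
-- # and the result dict is built per category by filtering the input; simpler decomposition, not faster.
-- _TABLE = [
--     ("carbon_sources", ("glc", "glucose")),
--     ("nitrogen_sources", ("nh", "nitrogen")),
--     ("phosphorus_sources", ("po", "phosphate")),
--     ("sulfur_sources", ("so", "sulfate")),
--     ("amino_acids", ("ala", "arg", "asn", "asp", "cys", "glu", "gln", "gly",
--                      "his", "ile", "leu", "lys", "met", "phe", "pro", "ser",
--                      "thr", "trp", "tyr", "val")),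
--     ("vitamins", ("vitamin", "thiamin", "riboflavin", "niacin", "folate", "cobalamin")),
--     ("minerals", ("fe", "mg", "mn", "zn", "cu", "ca", "k", "na")),
-- ]
--
--
-- def _classify(compound):
--     low = compound.lower()
--     for name, patterns in _TABLE:
--         if any(p in low for p in patterns):
--             return name
--     return "other"
--
--
-- def _categorize_compounds(compounds):
--     names = [name for name, _ in _TABLE] + ["other"]
--     return {name: [c for c in compounds if _classify(c) == name] for name in names}
-- ===== Notes on version B (the rewrite author's own statement) =====
-- stated objective: simpler
-- what changed: A's single loop that mutates a pre-built dict through an 8-branch if/elif chain is replaced by an ordered (category, patterns) table with a first-match classifier, and the result dict is built per category by filtering the input list.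
import Mathlib
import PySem

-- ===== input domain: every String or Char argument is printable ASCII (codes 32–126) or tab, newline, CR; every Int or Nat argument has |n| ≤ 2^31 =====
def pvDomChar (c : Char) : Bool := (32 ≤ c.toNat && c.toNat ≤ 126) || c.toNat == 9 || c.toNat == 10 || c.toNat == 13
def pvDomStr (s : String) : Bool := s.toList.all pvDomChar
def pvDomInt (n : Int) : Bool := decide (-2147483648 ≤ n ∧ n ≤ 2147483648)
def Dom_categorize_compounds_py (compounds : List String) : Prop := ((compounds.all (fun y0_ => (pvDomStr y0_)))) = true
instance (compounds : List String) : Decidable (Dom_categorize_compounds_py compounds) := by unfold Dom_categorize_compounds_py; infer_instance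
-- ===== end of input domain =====

-- B is a table-driven re-decomposition (classifier over an ordered pattern table + per-category
-- filter comprehension) of A's single mutate-a-dict loop; objective: simpler, not faster.

-- ===== PORT A =====
-- A-side helpers: the three literal pattern lists of A's `any(...)` branches
def pvAAs : List String :=
  ["ala","arg","asn","asp","cys","glu","gln","gly","his","ile",
   "leu","lys","met","phe","pro","ser","thr","trp","tyr","val"]
def pvVits : List String := ["vitamin","thiamin","riboflavin","niacin","folate","cobalamin"]
def pvMins : List String := ["fe","mg","mn","zn","cu","ca","k","na"]

def categorize_compounds_py (compounds : List String) : List (String × List String) :=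
  let init : PySem.Dict String (List String) := PySem.Dict.ofList
    [("carbon_sources", []), ("nitrogen_sources", []), ("phosphorus_sources", []),
     ("sulfur_sources", []), ("amino_acids", []), ("vitamins", []), ("minerals", []),
     ("other", [])]
  (compounds.foldl (fun cats compound =>
      if PySem.Str.isIn "glc" (PySem.Str.lower compound) || PySem.Str.isIn "glucose" (PySem.Str.lower compound) then
        cats.modify "carbon_sources" [] (· ++ [compound])
      else if PySem.Str.isIn "nh" (PySem.Str.lower compound) || PySem.Str.isIn "nitrogen" (PySem.Str.lower compound) then
        cats.modify "nitrogen_sources" [] (· ++ [compound])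
      else if PySem.Str.isIn "po" (PySem.Str.lower compound) || PySem.Str.isIn "phosphate" (PySem.Str.lower compound) then
        cats.modify "phosphorus_sources" [] (· ++ [compound])
      else if PySem.Str.isIn "so" (PySem.Str.lower compound) || PySem.Str.isIn "sulfate" (PySem.Str.lower compound) then
        cats.modify "sulfur_sources" [] (· ++ [compound])
      else if pvAAs.any (fun aa => PySem.Str.isIn aa (PySem.Str.lower compound)) then
        cats.modify "amino_acids" [] (· ++ [compound])
      else if pvVits.any (fun vit => PySem.Str.isIn vit (PySem.Str.lower compound)) then
        cats.modify "vitamins" [] (· ++ [compound])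
      else if pvMins.any (fun mn => PySem.Str.isIn mn (PySem.Str.lower compound)) then
        cats.modify "minerals" [] (· ++ [compound])
      else
        cats.modify "other" [] (· ++ [compound])) init).items

-- ===== PORT B =====
-- B-side helpers: the ordered (category, patterns) table and the first-match classifier
def pvTable : List (String × List String) :=
  [("carbon_sources", ["glc","glucose"]),
   ("nitrogen_sources", ["nh","nitrogen"]),
   ("phosphorus_sources", ["po","phosphate"]),
   ("sulfur_sources", ["so","sulfate"]),
   ("amino_acids", ["ala","arg","asn","asp","cys","glu","gln","gly","his","ile",
                    "leu","lys","met","phe","pro","ser","thr","trp","tyr","val"]),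
   ("vitamins", ["vitamin","thiamin","riboflavin","niacin","folate","cobalamin"]),
   ("minerals", ["fe","mg","mn","zn","cu","ca","k","na"])]

def pvClassify (compound : String) : String :=
  let low := PySem.Str.lower compound
  match pvTable.find? (fun np => np.2.any (fun p => PySem.Str.isIn p low)) with
  | some np => np.1
  | none => "other"

def categorize_compounds_py_alt (compounds : List String) : List (String × List String) :=
  (pvTable.map (·.1) ++ ["other"]).map
    (fun name => (name, compounds.filter (fun c => pvClassify c == name)))

-- ===== PRECONDITION & SPEC =====
def Spec_categorize_compounds_py (compounds : List String) (out : List (String × List String)) : Prop := out = categorize_compounds_py_alt compounds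
instance (compounds : List String) (out : List (String × List String)) : Decidable (Spec_categorize_compounds_py compounds out) := by unfold Spec_categorize_compounds_py; infer_instance

-- ===== CLAIM (what is proved, stated in full; the proofs are below) =====
def Claim_equal_categorize_compounds_py : Prop := ∀ (compounds : List String), Dom_categorize_compounds_py compounds → Spec_categorize_compounds_py compounds (categorize_compounds_py compounds)

-- ===== LEMMAS AND PROOFS =====

-- A's loop body, named so lemmas can speak about it (definitionally A's lambda)
def pvStepA (cats : PySem.Dict String (List String)) (compound : String) :
    PySem.Dict String (List String) :=
  if PySem.Str.isIn "glc" (PySem.Str.lower compound) || PySem.Str.isIn "glucose" (PySem.Str.lower compound) then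
    cats.modify "carbon_sources" [] (· ++ [compound])
  else if PySem.Str.isIn "nh" (PySem.Str.lower compound) || PySem.Str.isIn "nitrogen" (PySem.Str.lower compound) then
    cats.modify "nitrogen_sources" [] (· ++ [compound])
  else if PySem.Str.isIn "po" (PySem.Str.lower compound) || PySem.Str.isIn "phosphate" (PySem.Str.lower compound) then
    cats.modify "phosphorus_sources" [] (· ++ [compound])
  else if PySem.Str.isIn "so" (PySem.Str.lower compound) || PySem.Str.isIn "sulfate" (PySem.Str.lower compound) then
    cats.modify "sulfur_sources" [] (· ++ [compound])
  else if pvAAs.any (fun aa => PySem.Str.isIn aa (PySem.Str.lower compound)) then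
    cats.modify "amino_acids" [] (· ++ [compound])
  else if pvVits.any (fun vit => PySem.Str.isIn vit (PySem.Str.lower compound)) then
    cats.modify "vitamins" [] (· ++ [compound])
  else if pvMins.any (fun mn => PySem.Str.isIn mn (PySem.Str.lower compound)) then
    cats.modify "minerals" [] (· ++ [compound])
  else
    cats.modify "other" [] (· ++ [compound])

-- A's if-chain picks exactly the key B's first-match classifier picks
-- A's if-chain picks exactly the key B's first-match classifier picks
theorem pvStepA_eq (cats : PySem.Dict String (List String)) (c : String) :
    pvStepA cats c = cats.modify (pvClassify c) [] (· ++ [c]) := by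
  unfold pvStepA pvClassify
  split_ifs <;>
    simp_all only [pvTable, pvAAs, pvVits, pvMins, List.find?, List.any_cons, List.any_nil,
      Bool.or_false, Bool.not_eq_true]

def pvD (l1 l2 l3 l4 l5 l6 l7 l8 : List String) : PySem.Dict String (List String) :=
  PySem.Dict.mk
    [("carbon_sources", l1), ("nitrogen_sources", l2), ("phosphorus_sources", l3),
     ("sulfur_sources", l4), ("amino_acids", l5), ("vitamins", l6), ("minerals", l7),
     ("other", l8)]

theorem pvD_mod1 (l1 l2 l3 l4 l5 l6 l7 l8 : List String) (c : String) :
    (pvD l1 l2 l3 l4 l5 l6 l7 l8).modify "carbon_sources" [] (· ++ [c]) = pvD (l1++[c]) l2 l3 l4 l5 l6 l7 l8 := rfl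
theorem pvD_mod2 (l1 l2 l3 l4 l5 l6 l7 l8 : List String) (c : String) :
    (pvD l1 l2 l3 l4 l5 l6 l7 l8).modify "nitrogen_sources" [] (· ++ [c]) = pvD l1 (l2++[c]) l3 l4 l5 l6 l7 l8 := rfl
theorem pvD_mod3 (l1 l2 l3 l4 l5 l6 l7 l8 : List String) (c : String) :
    (pvD l1 l2 l3 l4 l5 l6 l7 l8).modify "phosphorus_sources" [] (· ++ [c]) = pvD l1 l2 (l3++[c]) l4 l5 l6 l7 l8 := rfl
theorem pvD_mod4 (l1 l2 l3 l4 l5 l6 l7 l8 : List String) (c : String) :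
    (pvD l1 l2 l3 l4 l5 l6 l7 l8).modify "sulfur_sources" [] (· ++ [c]) = pvD l1 l2 l3 (l4++[c]) l5 l6 l7 l8 := rfl
theorem pvD_mod5 (l1 l2 l3 l4 l5 l6 l7 l8 : List String) (c : String) :
    (pvD l1 l2 l3 l4 l5 l6 l7 l8).modify "amino_acids" [] (· ++ [c]) = pvD l1 l2 l3 l4 (l5++[c]) l6 l7 l8 := rfl
theorem pvD_mod6 (l1 l2 l3 l4 l5 l6 l7 l8 : List String) (c : String) :
    (pvD l1 l2 l3 l4 l5 l6 l7 l8).modify "vitamins" [] (· ++ [c]) = pvD l1 l2 l3 l4 l5 (l6++[c]) l7 l8 := rfl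
theorem pvD_mod7 (l1 l2 l3 l4 l5 l6 l7 l8 : List String) (c : String) :
    (pvD l1 l2 l3 l4 l5 l6 l7 l8).modify "minerals" [] (· ++ [c]) = pvD l1 l2 l3 l4 l5 l6 (l7++[c]) l8 := rfl
theorem pvD_mod8 (l1 l2 l3 l4 l5 l6 l7 l8 : List String) (c : String) :
    (pvD l1 l2 l3 l4 l5 l6 l7 l8).modify "other" [] (· ++ [c]) = pvD l1 l2 l3 l4 l5 l6 l7 (l8++[c]) := rfl

theorem pvClassify_mem (c : String) :
    pvClassify c = "carbon_sources" ∨ pvClassify c = "nitrogen_sources" ∨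
    pvClassify c = "phosphorus_sources" ∨ pvClassify c = "sulfur_sources" ∨
    pvClassify c = "amino_acids" ∨ pvClassify c = "vitamins" ∨
    pvClassify c = "minerals" ∨ pvClassify c = "other" := by
  unfold pvClassify
  rcases h : pvTable.find? (fun np => np.2.any (fun p => PySem.Str.isIn p (PySem.Str.lower c))) with _ | np
  · simp only [h]; simp
  · have hm := List.mem_of_find?_eq_some h
    simp only [h]
    simp only [pvTable, List.mem_cons, List.not_mem_nil, or_false] at hm
    rcases hm with h1 | h1 | h1 | h1 | h1 | h1 | h1 <;> subst h1 <;> simp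

theorem pvFold (cs : List String) :
    ∀ l1 l2 l3 l4 l5 l6 l7 l8,
    (cs.foldl (fun d c => d.modify (pvClassify c) [] (· ++ [c])) (pvD l1 l2 l3 l4 l5 l6 l7 l8)).items
      = [("carbon_sources", l1 ++ cs.filter (fun c => pvClassify c == "carbon_sources")),
         ("nitrogen_sources", l2 ++ cs.filter (fun c => pvClassify c == "nitrogen_sources")),
         ("phosphorus_sources", l3 ++ cs.filter (fun c => pvClassify c == "phosphorus_sources")),
         ("sulfur_sources", l4 ++ cs.filter (fun c => pvClassify c == "sulfur_sources")),
         ("amino_acids", l5 ++ cs.filter (fun c => pvClassify c == "amino_acids")),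
         ("vitamins", l6 ++ cs.filter (fun c => pvClassify c == "vitamins")),
         ("minerals", l7 ++ cs.filter (fun c => pvClassify c == "minerals")),
         ("other", l8 ++ cs.filter (fun c => pvClassify c == "other"))] := by
  induction cs with
  | nil => intro l1 l2 l3 l4 l5 l6 l7 l8; simp [pvD]
  | cons c cs ih =>
    intro l1 l2 l3 l4 l5 l6 l7 l8
    rw [List.foldl_cons]
    rcases pvClassify_mem c with hc | hc | hc | hc | hc | hc | hc | hc <;>
      rw [hc] <;>
      (first | rw [pvD_mod1] | rw [pvD_mod2] | rw [pvD_mod3] | rw [pvD_mod4]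
             | rw [pvD_mod5] | rw [pvD_mod6] | rw [pvD_mod7] | rw [pvD_mod8]) <;>
      rw [ih] <;>
      simp [hc, List.append_assoc]

-- ===== VERDICT (by name: the statement is the Claim_ definition above) =====
theorem categorize_compounds_py_spec : Claim_equal_categorize_compounds_py := by
  intro compounds _
  show categorize_compounds_py compounds = categorize_compounds_py_alt compounds
  have hA : categorize_compounds_py compounds
      = (compounds.foldl pvStepA (pvD [] [] [] [] [] [] [] [])).items := rfl
  rw [hA, show pvStepA = (fun d c => d.modify (pvClassify c) [] (· ++ [c]))
        from funext fun d => funext fun c => pvStepA_eq d c, pvFold]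
  simp [categorize_compounds_py_alt, pvTable]
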